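-- pv_equiv track=rewrite | github.com/alpha3002025/daily-codingtest | programmers/dfs-tree/lv3-표현-가능한-이진트리/solution.py | solution
-- ===== SOURCE A (Python) =====
-- def check_tree(binary_sub):
--     # 기저 사례: 길이가 1이면(리프 노드) 항상 True (1이든 0이든 상관없음)
--     if len(binary_sub) == 1:
--         return True
--
--     mid = len(binary_sub) // 2
--     root = binary_sub[mid]
--     left_sub = binary_sub[:mid]
--     right_sub = binary_sub[mid+1:]
--
--     # 루트가 0인데 자식 중에 1이 하나라도 있으면 False (불가능한 트리)
--     if root == '0':
--         # 자식 서브트리에 '1'이 포함되어 있다면 유효하지 않음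
--         if '1' in left_sub or '1' in right_sub:
--             return False
--
--     # 그 외의 경우(루트가 1이거나, 루트가 0이고 자식도 다 0인 경우)
--     # 왼쪽과 오른쪽 서브트리도 재귀적으로 확인
--     return check_tree(left_sub) and check_tree(right_sub)
--
-- def solution(numbers):
--     answer = []
--
--     for num in numbers:
--         # 1. 이진수 변환 (0b 접두어 제거)
--         binary_str = bin(num)[2:]
--         length = len(binary_str)
--
--         # 2. 포화 이진트리 길이로 맞추기 (Padding)
--         # 2^h - 1 형태가 될 때까지 h를 증가
--         h = 0
--         while (2**h - 1) < length:
--             h += 1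
--
--         full_length = 2**h - 1
--         # 앞부분에 0을 채워서 길이 맞춤
--         padded_binary = binary_str.zfill(full_length)
--
--         # 3. 트리 유효성 검사
--         if check_tree(padded_binary):
--             answer.append(1)
--         else:
--             answer.append(0)
--
--     return answer
-- ===== SOURCE B (Python) =====
-- def solution(numbers):
--     res = []
--     for num in numbers:
--         s = bin(num)[2:]
--         n = len(s)
--         full = 1
--         while full < n:
--             full = full * 2 + 1
--         pad = full - n
--
--         def ok(lo, hi, zero_anc):
--             # single pass over positions, carrying "some ancestor is '0'" flag
--             if lo >= hi:
--                 return True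
--             mid = (lo + hi) // 2
--             c = '0' if mid < pad else s[mid - pad]
--             if c == '1' and zero_anc:
--                 return False
--             za = zero_anc or c == '0'
--             return ok(lo, mid, za) and ok(mid + 1, hi, za)
--
--         res.append(1 if ok(0, full, False) else 0)
--     return res
-- ===== Notes on version B (the rewrite author's own statement) =====
-- stated objective: alternative
-- what changed: Replaces A's recursive check_tree on string slices (which re-scans each subtree with substring '1'-membership tests at every '0' root) by a single index-based DFS over the virtually padded bit string that carries an ancestor-zero flag, visiting each position once with no slicing or rescanning.
import Mathlib
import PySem

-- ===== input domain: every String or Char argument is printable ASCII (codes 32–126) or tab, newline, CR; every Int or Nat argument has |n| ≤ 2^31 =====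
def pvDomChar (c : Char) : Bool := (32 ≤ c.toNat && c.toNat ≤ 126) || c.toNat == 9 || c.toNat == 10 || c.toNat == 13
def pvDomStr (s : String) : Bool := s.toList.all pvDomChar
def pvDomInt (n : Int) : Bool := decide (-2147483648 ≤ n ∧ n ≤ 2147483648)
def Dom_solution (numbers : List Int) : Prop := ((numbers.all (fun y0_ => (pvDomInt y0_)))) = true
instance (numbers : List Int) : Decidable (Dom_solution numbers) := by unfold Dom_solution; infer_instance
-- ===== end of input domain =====

-- B replaces A's recursive check on string slices (substring '1'-scans at every '0' root)
-- by one index-based DFS carrying an ancestor-zero flag (objective: alternative).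
-- Recursions are written structurally on a fuel argument that provably suffices
-- (fuel is only a totality guard; the computed values are exactly the Pythons').

-- ===== PORT A =====

-- bin(n)[2:] : binary digits MSB-first; for negative n Python gives '-0b…'[2:] = 'b' ++ digits.
-- fuel n suffices: the argument at least halves each step.
def pyBinDigitsF : Nat → Nat → List Char
  | 0, _ => []
  | f + 1, n => if n = 0 then [] else pyBinDigitsF f (n / 2) ++ [if n % 2 = 1 then '1' else '0']

def pyBinDigits (n : Nat) : List Char := pyBinDigitsF n n

def pyBin (n : Int) : List Char :=
  if n < 0 then 'b' :: pyBinDigits (-n).toNat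
  else if n = 0 then ['0']
  else pyBinDigits n.toNat

-- the `while (2**h - 1) < length: h += 1` loop of A; fuel length+1 suffices (h ≤ 2^h - 1)
def hLoopAF : Nat → Nat → Nat → Nat
  | 0, h, _ => h
  | f + 1, h, length => if 2 ^ h - 1 < length then hLoopAF f (h + 1) length else h

def hLoopA (h length : Nat) : Nat := hLoopAF (length + 1) h length

-- A's check_tree; Python raises on the empty string but never reaches it (fuel 0 / length 0 yields True).
def checkTreeF : Nat → List Char → Bool
  | 0, _ => true
  | f + 1, s =>
    if s.length ≤ 1 then true
    else
      if s.getD (s.length / 2) ' ' = '0'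
          && ((s.take (s.length / 2)).contains '1' || (s.drop (s.length / 2 + 1)).contains '1')
      then false
      else checkTreeF f (s.take (s.length / 2)) && checkTreeF f (s.drop (s.length / 2 + 1))

def checkTree (s : List Char) : Bool := checkTreeF s.length s

def solution (numbers : List Int) : List Int :=
  numbers.foldl (fun answer num =>
    let binary := pyBin num
    let length := binary.length
    let h := hLoopA 0 length
    let full := 2 ^ h - 1
    let padded := List.replicate (full - length) '0' ++ binary   -- zfill
    answer ++ [if checkTree padded then (1 : Int) else 0]) []

-- ===== PORT B =====

-- the `full = 1; while full < n: full = full*2+1` loop of B; fuel n+1 suffices (full grows each step)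
def fullLoopBF : Nat → Nat → Nat → Nat
  | 0, full, _ => full
  | f + 1, full, n => if full < n then fullLoopBF f (full * 2 + 1) n else full

def fullLoopB (full n : Nat) : Nat := fullLoopBF (n + 1) full n

-- B's ok(lo, hi, zero_anc): index DFS over the virtually padded bit string; fuel hi-lo suffices
def okBF : Nat → List Char → Nat → Nat → Nat → Bool → Bool
  | 0, _, _, _, _, _ => true
  | f + 1, s, pad, lo, hi, za =>
    if lo ≥ hi then true
    else
      let mid := (lo + hi) / 2
      let c := if mid < pad then '0' else s.getD (mid - pad) ' '
      if c = '1' && za then false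
      else
        let za' := za || c = '0'
        okBF f s pad lo mid za' && okBF f s pad (mid + 1) hi za'

def okB (s : List Char) (pad lo hi : Nat) (za : Bool) : Bool := okBF (hi - lo) s pad lo hi za

def solution_alt (numbers : List Int) : List Int :=
  numbers.foldl (fun res num =>
    let s := pyBin num
    let n := s.length
    let full := fullLoopB 1 n
    let pad := full - n
    res ++ [if okB s pad 0 full false then (1 : Int) else 0]) []

-- ===== PRECONDITION & SPEC =====
def Spec_solution (numbers : List Int) (out : List Int) : Prop := out = solution_alt numbers
instance (numbers : List Int) (out : List Int) : Decidable (Spec_solution numbers out) := by unfold Spec_solution; infer_instance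

-- ===== CLAIM (what is proved, stated in full; the proofs are below) =====
def Claim_equal_solution : Prop := ∀ (numbers : List Int), Dom_solution numbers → Spec_solution numbers (solution numbers)

-- ===== LEMMAS AND PROOFS =====

-- fuel irrelevance / unfolding equations ---------------------------------------------------------

lemma checkTreeF_fuel (f : Nat) : ∀ (f' : Nat) (s : List Char),
    s.length ≤ f → s.length ≤ f' → checkTreeF f s = checkTreeF f' s := by
  induction f with
  | zero =>
      intro f' s h1 _
      have hs : s = [] := List.eq_nil_of_length_eq_zero (by omega)
      subst hs
      cases f' <;> simp [checkTreeF]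
  | succ f ih =>
      intro f' s h1 h2
      cases f' with
      | zero =>
          have hs : s = [] := List.eq_nil_of_length_eq_zero (by omega)
          subst hs
          simp [checkTreeF]
      | succ f' =>
          simp only [checkTreeF]
          by_cases hl : s.length ≤ 1
          · simp [hl]
          · rw [ih f' (s.take (s.length / 2))
                  (by simp only [List.length_take]; omega)
                  (by simp only [List.length_take]; omega),
                ih f' (s.drop (s.length / 2 + 1))
                  (by simp only [List.length_drop]; omega)
                  (by simp only [List.length_drop]; omega)]

lemma checkTree_eq (s : List Char) :
    checkTree s =
      (if s.length ≤ 1 then true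
       else
         if s.getD (s.length / 2) ' ' = '0'
             && ((s.take (s.length / 2)).contains '1' || (s.drop (s.length / 2 + 1)).contains '1')
         then false
         else checkTree (s.take (s.length / 2)) && checkTree (s.drop (s.length / 2 + 1))) := by
  by_cases hl : s.length ≤ 1
  · rw [if_pos hl]
    cases hL : s.length with
    | zero =>
        have hs : s = [] := List.eq_nil_of_length_eq_zero hL
        subst hs; rfl
    | succ m =>
        unfold checkTree
        rw [hL]
        simp only [checkTreeF]
        rw [if_pos (by omega)]
  · rw [if_neg hl]
    obtain ⟨m, hm⟩ : ∃ m, s.length = m + 1 := ⟨s.length - 1, by omega⟩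
    unfold checkTree
    rw [hm]
    simp only [checkTreeF]
    rw [if_neg (by omega)]
    rw [checkTreeF_fuel m (s.take (s.length / 2)).length (s.take (s.length / 2))
          (by simp only [List.length_take]; omega) (le_refl _),
        checkTreeF_fuel m (s.drop (s.length / 2 + 1)).length (s.drop (s.length / 2 + 1))
          (by simp only [List.length_drop]; omega) (le_refl _)]
    rw [← hm]

lemma okBF_fuel (f : Nat) : ∀ (f' : Nat) (s : List Char) (pad lo hi : Nat) (za : Bool),
    hi - lo ≤ f → hi - lo ≤ f' → okBF f s pad lo hi za = okBF f' s pad lo hi za := by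
  induction f with
  | zero =>
      intro f' s pad lo hi za h1 _
      cases f' with
      | zero => rfl
      | succ f' =>
          simp only [okBF]
          rw [if_pos (by omega)]
  | succ f ih =>
      intro f' s pad lo hi za h1 h2
      cases f' with
      | zero =>
          simp only [okBF]
          rw [if_pos (by omega)]
      | succ f' =>
          simp only [okBF]
          by_cases hlt : lo ≥ hi
          · simp [hlt]
          · rw [if_neg hlt, if_neg hlt]
            have hmid1 : (lo + hi) / 2 - lo ≤ f := by omega
            have hmid2 : hi - ((lo + hi) / 2 + 1) ≤ f := by omega
            rw [ih f' s pad lo ((lo + hi) / 2) _ hmid1 (by omega),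
                ih f' s pad ((lo + hi) / 2 + 1) hi _ hmid2 (by omega)]

lemma okB_eq (s : List Char) (pad lo hi : Nat) (za : Bool) :
    okB s pad lo hi za =
      (if lo ≥ hi then true
       else
         if (if (lo + hi) / 2 < pad then '0' else s.getD ((lo + hi) / 2 - pad) ' ') = '1' && za
         then false
         else
           okB s pad lo ((lo + hi) / 2)
               (za || (if (lo + hi) / 2 < pad then '0' else s.getD ((lo + hi) / 2 - pad) ' ') = '0')
             && okB s pad ((lo + hi) / 2 + 1) hi
               (za || (if (lo + hi) / 2 < pad then '0' else s.getD ((lo + hi) / 2 - pad) ' ') = '0')) := by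
  by_cases hlt : lo ≥ hi
  · rw [if_pos hlt]
    unfold okB
    have h0 : hi - lo = 0 := by omega
    rw [h0]
    rfl
  · rw [if_neg hlt]
    obtain ⟨m, hm⟩ : ∃ m, hi - lo = m + 1 := ⟨hi - lo - 1, by omega⟩
    unfold okB
    rw [hm]
    simp only [okBF]
    rw [if_neg hlt]
    rw [okBF_fuel m ((lo + hi) / 2 - lo) s pad lo ((lo + hi) / 2) _ (by omega) (le_refl _),
        okBF_fuel m (hi - ((lo + hi) / 2 + 1)) s pad ((lo + hi) / 2 + 1) hi _ (by omega) (le_refl _)]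

-- the padding/height loops ------------------------------------------------------------------------

lemma hLoopAF_ge (f : Nat) : ∀ (h n : Nat), n ≤ 2 ^ h - 1 + f → n ≤ 2 ^ hLoopAF f h n - 1 := by
  induction f with
  | zero => intro h n hf; simpa [hLoopAF] using hf
  | succ f ih =>
      intro h n hf
      simp only [hLoopAF]
      split
      · refine ih (h + 1) n ?_
        have : 2 ^ h < 2 ^ (h + 1) := Nat.pow_lt_pow_succ (by norm_num)
        omega
      · omega

lemma hLoopAF_fuel (f : Nat) : ∀ (f' h n : Nat),
    n ≤ 2 ^ h - 1 + f → n ≤ 2 ^ h - 1 + f' → hLoopAF f h n = hLoopAF f' h n := by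
  induction f with
  | zero =>
      intro f' h n hf _
      cases f' with
      | zero => rfl
      | succ f' =>
          simp only [hLoopAF]
          rw [if_neg (by omega)]
  | succ f ih =>
      intro f' h n hf hf'
      cases f' with
      | zero =>
          simp only [hLoopAF]
          rw [if_neg (by omega)]
      | succ f' =>
          simp only [hLoopAF]
          split
          · refine ih f' (h + 1) n ?_ ?_ <;>
              · have : 2 ^ h < 2 ^ (h + 1) := Nat.pow_lt_pow_succ (by norm_num)
                omega
          · rfl

lemma fullLoopBF_sync (f : Nat) : ∀ (h n : Nat), fullLoopBF f (2 ^ h - 1) n = 2 ^ hLoopAF f h n - 1 := by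
  induction f with
  | zero => intro h n; rfl
  | succ f ih =>
      intro h n
      simp only [fullLoopBF, hLoopAF]
      split
      · have h2 : (2 ^ h - 1) * 2 + 1 = 2 ^ (h + 1) - 1 := by
          have h1 : 1 ≤ 2 ^ h := Nat.one_le_two_pow
          have h3 : 2 ^ (h + 1) = 2 ^ h * 2 := by ring
          omega
        rw [h2]
        exact ih (h + 1) n
      · rfl

lemma hLoopA_ge (h n : Nat) : n ≤ 2 ^ hLoopA h n - 1 :=
  hLoopAF_ge (n + 1) h n (by omega)

lemma fullLoopB_eq_hLoopA (n : Nat) (hn : 1 ≤ n) : fullLoopB 1 n = 2 ^ hLoopA 0 n - 1 := by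
  have h1 : fullLoopB 1 n = 2 ^ hLoopAF (n + 1) 1 n - 1 := by
    rw [fullLoopB]
    simpa using fullLoopBF_sync (n + 1) 1 n
  have h2 : hLoopA 0 n = hLoopAF (n + 1) 1 n := by
    rw [hLoopA]
    simp only [hLoopAF]
    rw [if_pos (by simpa using hn)]
    have hp : (2 : Nat) ^ 1 = 2 := pow_one 2
    exact hLoopAF_fuel n (n + 1) 1 n (by omega) (by omega)
  rw [h1, h2]

-- characterisations of check_tree ----------------------------------------------------------------

lemma checkTree_no_one (t : List Char) (hno : t.contains '1' = false) : checkTree t = true := by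
  rw [checkTree_eq]
  split
  · rfl
  · have hl : (t.take (t.length / 2)).contains '1' = false := by
      by_contra hc
      simp only [Bool.not_eq_false, List.contains_eq_mem, decide_eq_true_eq] at hc
      have := (List.take_sublist _ t).mem hc
      simp [List.contains_eq_mem, this] at hno
    have hr : (t.drop (t.length / 2 + 1)).contains '1' = false := by
      by_contra hc
      simp only [Bool.not_eq_false, List.contains_eq_mem, decide_eq_true_eq] at hc
      have := (List.drop_sublist _ t).mem hc
      simp [List.contains_eq_mem, this] at hno
    rw [hl, hr, checkTree_no_one _ hl, checkTree_no_one _ hr]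
    simp
termination_by t.length
decreasing_by
  · simp only [List.length_take]; omega
  · simp only [List.length_drop]; omega

lemma getD_padded (pad i : Nat) (s : List Char) :
    (List.replicate pad '0' ++ s).getD i ' ' = if i < pad then '0' else s.getD (i - pad) ' ' := by
  by_cases hcase : i < pad
  · rw [if_pos hcase, List.getD_eq_getElem?_getD,
      List.getElem?_append_left (by simpa using hcase),
      List.getElem?_replicate_of_lt hcase]
    rfl
  · rw [if_neg hcase, List.getD_eq_getElem?_getD,
      List.getElem?_append_right (by simp; omega)]
    simp [List.getD_eq_getElem?_getD]

lemma contains_one_decomp (X Y : List Char) (ch : Char) :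
    (X ++ ch :: Y).contains '1' = (X.contains '1' || (ch = '1') || Y.contains '1') := by
  by_cases h : ch = '1'
  · simp [List.contains_eq_mem, h]
  · simp [List.contains_eq_mem, h, Ne.symm h]

-- the heart: okB over [lo, lo+2^k-1) computes A's check on the padded slice
lemma okB_eq_checkTree (s : List Char) (pad : Nat) (k lo : Nat) (za : Bool)
    (hb : lo + (2 ^ k - 1) ≤ pad + s.length) :
    okB s pad lo (lo + (2 ^ k - 1)) za
      = (if za then !(((List.replicate pad '0' ++ s).drop lo).take (2 ^ k - 1)).contains '1'
         else checkTree (((List.replicate pad '0' ++ s).drop lo).take (2 ^ k - 1))) := by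
  induction k generalizing lo za with
  | zero =>
      simp [okB, okBF, checkTree, checkTreeF]
  | succ k ih =>
      set T := List.replicate pad '0' ++ s with hT
      have hTlen : T.length = pad + s.length := by simp [hT]
      have hpow : 1 ≤ 2 ^ k := Nat.one_le_two_pow
      set L := 2 ^ k - 1 with hL
      have hL2 : 2 ^ (k + 1) - 1 = 2 * L + 1 := by
        have : 2 ^ (k + 1) = 2 * 2 ^ k := by ring
        omega
      have hmid : (lo + (lo + (2 ^ (k + 1) - 1))) / 2 = lo + L := by omega
      have hmidlt : lo + L < T.length := by omega
      have hc : (if lo + L < pad then '0' else s.getD (lo + L - pad) ' ') = T.getD (lo + L) ' ' := by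
        rw [hT, getD_padded]
      set c := T.getD (lo + L) ' ' with hcdef
      set seg := (T.drop lo).take (2 ^ (k + 1) - 1) with hseg
      have hseglen : seg.length = 2 * L + 1 := by
        simp only [hseg, List.length_take, List.length_drop]
        omega
      have hsegL : seg.take L = (T.drop lo).take L := by
        simp only [hseg, List.take_take]
        congr 1
        omega
      have hsegR : seg.drop (L + 1) = (T.drop (lo + L + 1)).take L := by
        simp only [hseg, List.drop_take, List.drop_drop]
        congr 1
        omega
      have hsegmid : seg.getD L ' ' = c := by
        simp only [hseg, hcdef, List.getD_eq_getElem?_getD,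
          List.getElem?_take_of_lt (show L < 2 ^ (k + 1) - 1 by omega), List.getElem?_drop]
      have hsegcont : seg.contains '1'
          = (((T.drop lo).take L).contains '1' || (c = '1') || ((T.drop (lo + L + 1)).take L).contains '1') := by
        have hdecomp : seg = seg.take L ++ seg.getD L ' ' :: seg.drop (L + 1) := by
          have h1 : seg.drop L = seg.getD L ' ' :: seg.drop (L + 1) := by
            rw [List.getD_eq_getElem?_getD]
            rw [List.drop_eq_getElem_cons (by omega)]
            rw [List.getElem?_eq_getElem (by omega : L < seg.length)]
            rfl
          conv_lhs => rw [← List.take_append_drop L seg, h1]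
        conv_lhs => rw [hdecomp]
        rw [hsegL, hsegmid, hsegR, contains_one_decomp]
      rw [okB_eq]
      rw [if_neg (by omega)]
      simp only [hmid, hc]
      have hih1 : okB s pad lo (lo + L) (za || decide (c = '0'))
          = (if (za || decide (c = '0')) then !(((T.drop lo).take L).contains '1')
             else checkTree ((T.drop lo).take L)) := by
        have := ih lo (za || decide (c = '0')) (by omega)
        simpa [← hT, ← hL] using this
      have hih2 : okB s pad (lo + L + 1) (lo + (2 ^ (k + 1) - 1)) (za || decide (c = '0'))
          = (if (za || decide (c = '0')) then !(((T.drop (lo + L + 1)).take L).contains '1')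
             else checkTree ((T.drop (lo + L + 1)).take L)) := by
        have := ih (lo + L + 1) (za || decide (c = '0')) (by omega)
        have harith : lo + L + 1 + (2 ^ k - 1) = lo + (2 ^ (k + 1) - 1) := by omega
        rw [harith] at this
        simpa [← hT, ← hL] using this
      by_cases hk0 : k = 0
      · subst hk0
        have hL0 : L = 0 := by norm_num [hL]
        have hct : checkTree seg = true := by
          rw [checkTree_eq, if_pos (by omega)]
        have e1 : okB s pad lo (lo + L) (za || decide (c = '0')) = true := by
          rw [okB_eq, if_pos (by omega)]
        have e2 : okB s pad (lo + L + 1) (lo + (2 ^ (0 + 1) - 1)) (za || decide (c = '0')) = true := by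
          rw [okB_eq, if_pos (by omega)]
        rw [e1, e2, hct, hsegcont, hL0]
        simp only [List.take_zero, List.contains_nil]
        cases za <;> by_cases h1 : c = '1' <;> simp [h1]
      · have hLpos : 1 ≤ L := by
          have h2k : 2 ≤ 2 ^ k := by
            calc (2:Nat) = 2 ^ 1 := by norm_num
            _ ≤ 2 ^ k := Nat.pow_le_pow_right (by norm_num) (by omega)
          omega
        have hck : checkTree seg
            = (if decide (c = '0') && (((T.drop lo).take L).contains '1' || ((T.drop (lo + L + 1)).take L).contains '1')
               then false
               else checkTree ((T.drop lo).take L) && checkTree ((T.drop (lo + L + 1)).take L)) := by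
          rw [checkTree_eq]
          rw [if_neg (by omega)]
          have hm : seg.length / 2 = L := by omega
          simp only [hm]
          rw [hsegmid, hsegL, hsegR]
        rw [hck, hih1, hih2, hsegcont]
        cases za with
        | true =>
            by_cases h1 : c = '1' <;> simp [h1]
        | false =>
            by_cases h0 : c = '0'
            · cases hLc : (((T.drop lo).take L).contains '1') <;>
                cases hRc : (((T.drop (lo + L + 1)).take L).contains '1')
              · simp [h0, checkTree_no_one _ hLc, checkTree_no_one _ hRc]
              · simp [h0]
              · simp [h0]
              · simp [h0]
            · by_cases h1 : c = '1' <;> simp [h0, h1]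

-- per-number agreement of the two pipelines
lemma elem_eq (s : List Char) (hn : 1 ≤ s.length) :
    checkTree (List.replicate (2 ^ hLoopA 0 s.length - 1 - s.length) '0' ++ s)
      = okB s (fullLoopB 1 s.length - s.length) 0 (fullLoopB 1 s.length) false := by
  set n := s.length with hndef
  have hful : fullLoopB 1 n = 2 ^ hLoopA 0 n - 1 := fullLoopB_eq_hLoopA n hn
  set h := hLoopA 0 n with hh
  have hge : n ≤ 2 ^ h - 1 := hLoopA_ge 0 n
  set pad := 2 ^ h - 1 - n with hpad
  have hkey := okB_eq_checkTree s pad h 0 false (by omega)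
  have hTlen : (List.replicate pad '0' ++ s).length = 2 ^ h - 1 := by
    simp only [List.length_append, List.length_replicate]
    omega
  rw [hful, ← hpad]
  have hz : (0 : Nat) + (2 ^ h - 1) = 2 ^ h - 1 := by omega
  rw [hz] at hkey
  rw [hkey]
  simp only [if_neg (by simp : ¬ (false = true)), List.drop_zero]
  rw [List.take_of_length_le (by omega)]

-- pyBin is never empty (so lengths are ≥ 1)
lemma pyBin_len_pos (n : Int) : 1 ≤ (pyBin n).length := by
  rw [pyBin]
  split
  · simp
  · split
    · simp
    · rename_i h1 h2
      have hpos : n.toNat ≠ 0 := by omega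
      obtain ⟨m, hm⟩ : ∃ m, n.toNat = m + 1 := ⟨n.toNat - 1, by omega⟩
      rw [pyBinDigits, hm]
      simp [pyBinDigitsF]

-- the two folds agree step by step
lemma fold_eq (l : List Int) (acc : List Int) :
    l.foldl (fun answer num =>
      let binary := pyBin num
      let length := binary.length
      let h := hLoopA 0 length
      let full := 2 ^ h - 1
      let padded := List.replicate (full - length) '0' ++ binary
      answer ++ [if checkTree padded then (1 : Int) else 0]) acc
    = l.foldl (fun res num =>
      let s := pyBin num
      let n := s.length
      let full := fullLoopB 1 n
      let pad := full - n
      res ++ [if okB s pad 0 full false then (1 : Int) else 0]) acc := by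
  induction l generalizing acc with
  | nil => rfl
  | cons x xs ih =>
      simp only [List.foldl_cons]
      rw [elem_eq (pyBin x) (pyBin_len_pos x)]
      exact ih _

-- ===== VERDICT (by name: the statement is the Claim_ definition above) =====
theorem solution_spec : Claim_equal_solution := by
  intro numbers _
  unfold Spec_solution solution solution_alt
  exact fold_eq numbers []
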